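-- pv_equiv track=rewrite | github.com/leveneg/2019adventofcode | 01/main.py | calcMass
-- ===== SOURCE A (Python) =====
-- def calcMass(base, isPartTwo=False):
--     calc = base // 3 - 2
--
--     if not isPartTwo:
--         return calc
--
--     rt = 0
--
--     while calc > 0:
--         rt += calc
--         calc = calc // 3 - 2
--
--     return rt
-- ===== SOURCE B (Python) =====
-- def calcMass(base, isPartTwo=False):
--     calc = base // 3 - 2
--     if not isPartTwo:
--         return calc
--     if calc <= 0:
--         return 0
--     return calc + calcMass(calc, True)
-- ===== Notes on version B (the rewrite author's own statement) =====
-- stated objective: idiomatic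
-- what changed: Replaced the while-loop accumulator in part two with direct recursion: calc + calcMass(calc, True), stopping at non-positive mass.
import Mathlib
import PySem

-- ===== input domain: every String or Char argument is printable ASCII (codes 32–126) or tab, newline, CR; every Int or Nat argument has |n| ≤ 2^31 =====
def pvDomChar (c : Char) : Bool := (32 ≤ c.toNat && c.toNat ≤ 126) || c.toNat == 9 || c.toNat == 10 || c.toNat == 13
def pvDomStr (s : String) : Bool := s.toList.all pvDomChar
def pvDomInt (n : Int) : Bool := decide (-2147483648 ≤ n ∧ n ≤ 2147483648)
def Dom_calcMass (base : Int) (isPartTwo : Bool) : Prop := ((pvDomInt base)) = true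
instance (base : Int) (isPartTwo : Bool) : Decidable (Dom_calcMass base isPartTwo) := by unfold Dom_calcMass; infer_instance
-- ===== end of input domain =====

-- B replaces A's while-loop accumulator (part two) with direct recursion; same values, idiomatic decomposition.

-- ===== PORT A =====
-- the `while m > 0: rt += m; m = m // 3 - 2` loop, state (m, rt)
def calcMassLoop (m rt : Int) : Int :=
  if h : m > 0 then
    calcMassLoop (PySem.Int.floordiv m 3 - 2) (rt + m)
  else rt
termination_by m.toNat
decreasing_by
  rw [PySem.Int.floordiv_eq_ediv_of_pos (by omega : (0:Int) < 3)]
  omega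

def calcMass (base : Int) (isPartTwo : Bool) : Int :=
  let m := PySem.Int.floordiv base 3 - 2
  if isPartTwo = false then m
  else calcMassLoop m 0

-- ===== PORT B =====
def calcMass_alt (base : Int) (isPartTwo : Bool) : Int :=
  let m := PySem.Int.floordiv base 3 - 2
  if isPartTwo = false then m
  else if h : m ≤ 0 then 0
  else m + calcMass_alt m true
termination_by base.toNat
decreasing_by
  simp only [m, PySem.Int.floordiv_eq_ediv_of_pos (by omega : (0:Int) < 3)] at h ⊢
  omega

-- ===== PRECONDITION & SPEC =====
def Spec_calcMass (base : Int) (isPartTwo : Bool) (out : Int) : Prop := out = calcMass_alt base isPartTwo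
instance (base : Int) (isPartTwo : Bool) (out : Int) : Decidable (Spec_calcMass base isPartTwo out) := by unfold Spec_calcMass; infer_instance

-- ===== CLAIM (what is proved, stated in full; the proofs are below) =====
def Claim_equal_calcMass : Prop := ∀ (base : Int) (isPartTwo : Bool), Dom_calcMass base isPartTwo → Spec_calcMass base isPartTwo (calcMass base isPartTwo)

-- ===== LEMMAS AND PROOFS =====

-- B's part-two branch, as a function of the current mass
theorem calcMass_alt_true (c : Int) :
    calcMass_alt c true =
      (if PySem.Int.floordiv c 3 - 2 ≤ 0 then 0
       else (PySem.Int.floordiv c 3 - 2) + calcMass_alt (PySem.Int.floordiv c 3 - 2) true) := by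
  rw [calcMass_alt]
  simp only [Bool.true_eq_false, if_false]
  split <;> simp

theorem calcMassLoop_eq (m rt : Int) :
    calcMassLoop m rt = rt + (if m ≤ 0 then 0 else m + calcMass_alt m true) := by
  induction m, rt using calcMassLoop.induct with
  | case1 m rt h ih =>
      rw [calcMassLoop]
      rw [dif_pos h, ih, if_neg (show ¬ m ≤ 0 by omega)]
      rw [calcMass_alt_true m]
      split <;> ring
  | case2 m rt h =>
      rw [calcMassLoop]
      rw [dif_neg h, if_pos (by omega)]
      ring

-- ===== VERDICT (by name: the statement is the Claim_ definition above) =====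
theorem calcMass_spec : Claim_equal_calcMass := by
  intro base isPartTwo _
  unfold Spec_calcMass calcMass
  cases isPartTwo with
  | false => rw [calcMass_alt]; simp
  | true =>
      simp only [Bool.true_eq_false, if_false]
      rw [calcMassLoop_eq, calcMass_alt_true base, zero_add]
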